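-- pv_equiv track=rewrite | github.com/JoeBlack220/android-diff-parser | src/parse.py | shouldFilter
-- ===== SOURCE A (Python) =====
-- def shouldFilter(modifiers):
--     isPublic = False
--     isHiddenOrInternal = False
--     for modifier in modifiers:
--         if modifier == "public":
--             isPublic = True
--         if modifier == "hidden" or modifier == "internal":
--             isHiddenOrInternal = True
--     res = not(isPublic) or isHiddenOrInternal
--     return res
-- ===== SOURCE B (Python) =====
-- def shouldFilter(modifiers):
--     # Unfiltered exactly when the relevant-modifier set is precisely {"public"}:
--     # i.e. "public" present and neither "hidden" nor "internal" present.
--     return set(modifiers) & {"public", "hidden", "internal"} != {"public"}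
-- ===== Notes on version B (the rewrite author's own statement) =====
-- stated objective: alternative
-- what changed: Replaces the two-flag accumulating loop with a set-algebra formulation: intersect the modifier set with the three relevant keywords and test whether that intersection is exactly {"public"}.
import Mathlib
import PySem

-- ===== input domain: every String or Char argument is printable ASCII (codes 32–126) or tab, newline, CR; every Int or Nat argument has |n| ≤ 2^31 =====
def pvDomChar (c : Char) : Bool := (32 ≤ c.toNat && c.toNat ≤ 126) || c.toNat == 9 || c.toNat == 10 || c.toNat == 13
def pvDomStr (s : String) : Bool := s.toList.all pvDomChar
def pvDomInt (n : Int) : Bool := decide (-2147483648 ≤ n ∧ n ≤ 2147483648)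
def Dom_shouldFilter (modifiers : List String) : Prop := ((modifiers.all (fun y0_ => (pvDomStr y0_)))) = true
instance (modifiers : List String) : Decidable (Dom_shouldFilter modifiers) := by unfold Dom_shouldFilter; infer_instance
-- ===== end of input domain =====

-- B reformulates A's two-flag loop in set algebra: intersect with the three relevant keywords, compare with {"public"} (alternative; same cost).

-- ===== PORT A =====
-- literal port: fold over the two flags (isPublic, isHiddenOrInternal), then not isPublic || isHiddenOrInternal
def shouldFilter (modifiers : List String) : Bool :=
  let st := modifiers.foldl
    (fun (p : Bool × Bool) modifier =>
      let p := if modifier == "public" then (true, p.2) else p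
      if modifier == "hidden" || modifier == "internal" then (p.1, true) else p)
    (false, false)
  !st.1 || st.2

-- ===== PORT B =====
def shouldFilter_alt (modifiers : List String) : Bool :=
  !(PySem.Set.equal
      (PySem.Set.inter (PySem.Set.ofList modifiers) ["public", "hidden", "internal"])
      (PySem.Set.ofList ["public"]))

-- ===== PRECONDITION & SPEC =====
def Spec_shouldFilter (modifiers : List String) (out : Bool) : Prop := out = shouldFilter_alt modifiers
instance (modifiers : List String) (out : Bool) : Decidable (Spec_shouldFilter modifiers out) := by unfold Spec_shouldFilter; infer_instance

-- ===== CLAIM (what is proved, stated in full; the proofs are below) =====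
def Claim_equal_shouldFilter : Prop := ∀ (modifiers : List String), Dom_shouldFilter modifiers → Spec_shouldFilter modifiers (shouldFilter modifiers)

-- ===== LEMMAS AND PROOFS =====

-- Strings: m == s as decide (s = m), matching List.contains's orientation
theorem pv_beq_comm (a b : String) : (a == b) = decide (b = a) := by
  by_cases h : a = b
  · simp [h]
  · have h' : ¬ b = a := fun e => h e.symm
    simp [h, h']

-- invariant: A's fold computes the two membership tests, OR-accumulated from the start state
theorem shouldFilter_foldl_inv (modifiers : List String) (p h : Bool) :
    modifiers.foldl
      (fun (st : Bool × Bool) modifier =>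
        let st := if modifier == "public" then (true, st.2) else st
        if modifier == "hidden" || modifier == "internal" then (st.1, true) else st)
      (p, h)
    = (p || modifiers.contains "public",
       h || modifiers.contains "hidden" || modifiers.contains "internal") := by
  induction modifiers generalizing p h with
  | nil => simp
  | cons m ms ih =>
    rw [List.foldl_cons]
    have step :
        (let st := if m == "public" then ((true : Bool), h) else (p, h)
         if m == "hidden" || m == "internal" then (st.1, true) else st)
        = (p || (m == "public"), h || ((m == "hidden") || (m == "internal"))) := by
      by_cases hp : m == "public" <;> by_cases hhi : ((m == "hidden") || (m == "internal")) <;>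
        simp_all
    rw [step, ih]
    simp [pv_beq_comm, Bool.or_assoc, Bool.or_left_comm]

-- B's set comparison, characterised by the three membership tests
theorem shouldFilter_equal_iff (modifiers : List String) :
    PySem.Set.equal
        (PySem.Set.inter (PySem.Set.ofList modifiers) ["public", "hidden", "internal"])
        (PySem.Set.ofList ["public"]) = true
      ↔ ("public" ∈ modifiers ∧ "hidden" ∉ modifiers ∧ "internal" ∉ modifiers) := by
  rw [PySem.Set.equal_iff]
  constructor
  · intro hall
    refine ⟨?_, ?_, ?_⟩
    · have := (hall "public").mpr (by simp [PySem.Set.mem_ofList])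
      rw [PySem.Set.mem_inter, PySem.Set.mem_ofList] at this
      exact this.1
    · intro hm
      have := (hall "hidden").mp
        (by rw [PySem.Set.mem_inter, PySem.Set.mem_ofList]; exact ⟨hm, by simp⟩)
      simp [PySem.Set.mem_ofList] at this
    · intro hm
      have := (hall "internal").mp
        (by rw [PySem.Set.mem_inter, PySem.Set.mem_ofList]; exact ⟨hm, by simp⟩)
      simp [PySem.Set.mem_ofList] at this
  · rintro ⟨h1, h2, h3⟩ x
    rw [PySem.Set.mem_inter, PySem.Set.mem_ofList, PySem.Set.mem_ofList]
    constructor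
    · rintro ⟨hx, hx3⟩
      simp only [List.mem_cons, List.not_mem_nil, or_false] at hx3
      rcases hx3 with rfl | rfl | rfl
      · simp
      · exact absurd hx h2
      · exact absurd hx h3
    · intro hx
      simp only [List.mem_cons, List.not_mem_nil, or_false] at hx
      subst hx
      exact ⟨h1, by simp⟩

theorem shouldFilter_alt_eq (modifiers : List String) :
    shouldFilter_alt modifiers
    = (!(modifiers.contains "public") || modifiers.contains "hidden" || modifiers.contains "internal") := by
  unfold shouldFilter_alt
  cases hE : PySem.Set.equal
      (PySem.Set.inter (PySem.Set.ofList modifiers) ["public", "hidden", "internal"])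
      (PySem.Set.ofList ["public"]) with
  | true =>
    rcases (shouldFilter_equal_iff modifiers).mp hE with ⟨h1, h2, h3⟩
    simp [h1, h2, h3]
  | false =>
    have hne : ¬("public" ∈ modifiers ∧ "hidden" ∉ modifiers ∧ "internal" ∉ modifiers) := by
      intro hme
      rw [(shouldFilter_equal_iff modifiers).mpr hme] at hE
      exact Bool.noConfusion hE
    by_cases h1 : "public" ∈ modifiers <;> by_cases h2 : "hidden" ∈ modifiers <;>
      by_cases h3 : "internal" ∈ modifiers <;> simp_all

-- ===== VERDICT (by name: the statement is the Claim_ definition above) =====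
theorem shouldFilter_spec : Claim_equal_shouldFilter := by
  intro modifiers _
  unfold Spec_shouldFilter shouldFilter
  rw [shouldFilter_foldl_inv, shouldFilter_alt_eq]
  simp [Bool.or_assoc]
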